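-- pv_equiv track=rewrite | github.com/alstjrwjd99/BaekJun | 프로그래머스/3/152995. 인사고과/인사고과.py | solution
-- ===== SOURCE A (Python) =====
-- def solution(scores):
--     answer = 0
--     wanho = scores[0]
--     scores.sort(key=lambda x : (-x[0],x[1]))
--     cutline = scores[0][1]
--     worst = set()
--     for score in scores:
--         if score[1] < cutline :
--             if score == wanho:
--                 return -1
--             worst.add(tuple(score))
--         cutline = max(cutline,score[1])
--
--     incentive_list = []
--     for score in scores :
--         if tuple(score) not in worst:
--             incentive_list.append(score)
--
--     incentive_list.sort(key=lambda x:-sum(x))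
--     pure_rank = incentive_list.index(wanho)
--     if pure_rank == 0:
--         return 1
--
--     while True:
--         if sum(incentive_list[pure_rank]) == sum(incentive_list[pure_rank-1]):
--             pure_rank -= 1
--         else : break
--     return pure_rank + 1
-- ===== SOURCE B (Python) =====
-- def solution(scores):
--     # One fused pass after the sort: count rivals with a strictly larger sum
--     # instead of building incentive_list, re-sorting it and walking back over ties.
--     # (Like A, this sorts `scores` in place.)
--     wanho = scores[0]
--     wanho_sum = sum(wanho)
--     scores.sort(key=lambda x: (-x[0], x[1]))
--     cutline = scores[0][1]
--     rank = 1
--     for s in scores: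
--         if s[1] < cutline:
--             if s == wanho:
--                 return -1
--         elif sum(s) > wanho_sum:
--             rank += 1
--         cutline = max(cutline, s[1])
--     return rank
-- ===== Notes on version B (the rewrite author's own statement) =====
-- stated objective: simpler
-- what changed: A's whole second phase (build incentive_list, sort it by -sum, index wanho, walk back over equal-sum ties) is replaced by a single counting pass fused into the elimination loop: rank = 1 + number of non-dominated candidates with sum strictly greater than wanho's.
-- crash fix: When wanho survives elimination, every surviving candidate's sum ties wanho's and some non-dominated rival sorts strictly before wanho, A's tie-walk indexes past the front of the list and raises IndexError (e.g. [[1,2],[2,1]]); B returns the rank 1 there. A also raises IndexError on the empty list and on elements shorter than two entries, where B raises too. — e.g. on solution([[1, 2], [2, 1]]): A raises IndexError, B returns 1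
import Mathlib
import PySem

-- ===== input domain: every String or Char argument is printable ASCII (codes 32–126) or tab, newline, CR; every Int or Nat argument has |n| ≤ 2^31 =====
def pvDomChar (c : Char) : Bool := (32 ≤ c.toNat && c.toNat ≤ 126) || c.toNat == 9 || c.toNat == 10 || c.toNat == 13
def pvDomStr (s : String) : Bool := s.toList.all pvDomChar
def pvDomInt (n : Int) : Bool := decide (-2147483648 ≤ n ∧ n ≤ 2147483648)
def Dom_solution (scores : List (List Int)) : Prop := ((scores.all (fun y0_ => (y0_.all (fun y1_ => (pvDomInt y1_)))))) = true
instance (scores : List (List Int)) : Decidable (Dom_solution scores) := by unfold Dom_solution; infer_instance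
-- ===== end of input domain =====

-- B fuses A's second phase (build incentive_list, sort by -sum, index wanho, walk back over
-- ties) into one counting pass over the sorted list: rank = 1 + #rivals with strictly larger
-- sum among the non-dominated. Like A, the Python B sorts `scores` in place (same mutation);
-- the equivalence proved here is about the return value.


-- ===== PORT A =====
-- sort key of `scores.sort(key=lambda x : (-x[0],x[1]))`: a Python tuple compares
-- lexicographically, which is exactly `Lex (Int × Int)`. Pre_ guarantees every element has
-- length ≥ 2, so `getD 0 0` / `getD 1 0` are exactly x[0] / x[1] (Python raises otherwise).
def keyP (x : List Int) : Lex (Int × Int) := toLex (-(x.getD 0 0), x.getD 1 0)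

-- the first `for score in scores` loop: `none` = the `return -1` early exit
def phase1 (wanho : List Int) : List (List Int) → Int → PySem.Set (List Int) → Option (PySem.Set (List Int))
  | [], _, worst => some worst
  | s :: rest, cutline, worst =>
    if s.getD 1 0 < cutline then
      if s = wanho then none
      else phase1 wanho rest (max cutline (s.getD 1 0)) (worst.add s)
    else phase1 wanho rest (max cutline (s.getD 1 0)) worst

-- the final `while True` tie-walk; fuel is always sufficient (descent from r is bounded),
-- the `0` defaults are the IndexError exits, excluded by Pre_
def walkA (il : List (List Int)) : Nat → Int → Int
  | 0, _ => 0
  | fuel + 1, r =>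
    match PySem.List.pyGet? il r, PySem.List.pyGet? il (r - 1) with
    | some a, some b => if a.sum = b.sum then walkA il fuel (r - 1) else r + 1
    | _, _ => 0

def solution (scores : List (List Int)) : Int :=
  match PySem.List.pyGet? scores 0 with
  | none => 0          -- IndexError on scores[0]; Pre_ excludes scores = []
  | some wanho =>
    let ss := PySem.List.sorted scores keyP
    match phase1 wanho ss ((ss.headD []).getD 1 0) PySem.Set.empty with
    | none => -1
    | some worst =>
      let incentive := ss.foldl (fun acc s => if PySem.Set.contains worst s then acc else acc ++ [s]) []
      let il := PySem.List.sorted incentive (fun x => -x.sum)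
      match PySem.List.index? il wanho with
      | none => 0      -- ValueError; unreachable: wanho survives whenever phase1 returns `some`
      | some pr =>
        if pr = 0 then 1
        else walkA il (pr + il.length + 2) (pr : Int)

-- ===== PORT B =====
-- B's single fused pass: same cutline elimination, but counts rivals with a strictly
-- larger sum on the fly instead of A's whole second phase
def loopB (wanho : List Int) (wanhoSum : Int) : List (List Int) → Int → Int → Int
  | [], _, rank => rank
  | s :: rest, cutline, rank =>
    if s.getD 1 0 < cutline then
      if s = wanho then -1
      else loopB wanho wanhoSum rest (max cutline (s.getD 1 0)) rank
    else loopB wanho wanhoSum rest (max cutline (s.getD 1 0))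
           (if wanhoSum < s.sum then rank + 1 else rank)

def solution_alt (scores : List (List Int)) : Int :=
  match PySem.List.pyGet? scores 0 with
  | none => 0
  | some wanho =>
    let ss := PySem.List.sorted scores keyP
    loopB wanho wanho.sum ss ((ss.headD []).getD 1 0) 1

-- ===== PRECONDITION & SPEC =====
-- `s` is Pareto-dominated by some member of `l` (both coordinates strictly smaller)
def domByB (l : List (List Int)) (s : List Int) : Bool :=
  l.any (fun t => decide (s.getD 0 0 < t.getD 0 0) && decide (s.getD 1 0 < t.getD 1 0))

-- Pre_ excludes exactly the inputs where Python A raises: the empty list and elements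
-- shorter than 2 (IndexError in the sort key), and the inputs where the tie-walk runs off
-- the front of incentive_list and raises IndexError (wanho not dominated, every surviving
-- sum equal to wanho's, and some non-dominated rival sorts strictly before wanho).
def Pre_solution (scores : List (List Int)) : Prop :=
  scores ≠ [] ∧ (∀ s ∈ scores, 2 ≤ s.length) ∧
  ¬ (domByB scores (scores.headD []) = false ∧
     (∀ s ∈ scores, domByB scores s = true ∨ s.sum = (scores.headD []).sum) ∧
     (∃ t ∈ scores, domByB scores t = false ∧
        ((scores.headD []).getD 0 0 < t.getD 0 0 ∨
         (t.getD 0 0 = (scores.headD []).getD 0 0 ∧ t.getD 1 0 < (scores.headD []).getD 1 0))))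

instance (scores : List (List Int)) : Decidable (Pre_solution scores) := by
  unfold Pre_solution; infer_instance

def pvWitness_solution : List (List Int) := [[2, 2], [1, 4], [3, 2], [4, 1]]

-- On inputs where wanho survives, all surviving sums tie with wanho's, and a rival sorts
-- strictly before wanho, A's tie-walk indexes past the front and raises IndexError; B returns 1.
def Raises_solution (scores : List (List Int)) : Prop :=
  scores ≠ [] ∧ (∀ s ∈ scores, 2 ≤ s.length) ∧
  (domByB scores (scores.headD []) = false ∧
   (∀ s ∈ scores, domByB scores s = true ∨ s.sum = (scores.headD []).sum) ∧
   (∃ t ∈ scores, domByB scores t = false ∧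
      ((scores.headD []).getD 0 0 < t.getD 0 0 ∨
       (t.getD 0 0 = (scores.headD []).getD 0 0 ∧ t.getD 1 0 < (scores.headD []).getD 1 0))))

instance (scores : List (List Int)) : Decidable (Raises_solution scores) := by
  unfold Raises_solution; infer_instance

def pvRaiseWitness_solution : List (List Int) := [[1, 2], [2, 1]]
def pvRaiseWitnessOut_solution : Int := 1

def Spec_solution (scores : List (List Int)) (out : Int) : Prop := out = solution_alt scores
instance (scores : List (List Int)) (out : Int) : Decidable (Spec_solution scores out) := by unfold Spec_solution; infer_instance

-- ===== CLAIM (what is proved, stated in full; the proofs are below) =====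
def Claim_equal_solution : Prop := ∀ (scores : List (List Int)), Dom_solution scores → Pre_solution scores → Spec_solution scores (solution scores)

def Claim_raises_solution : Prop := (∀ (scores : List (List Int)), Dom_solution scores → Raises_solution scores → ¬ Pre_solution scores) ∧ (Dom_solution (pvRaiseWitness_solution) ∧ Raises_solution (pvRaiseWitness_solution) ∧ solution_alt (pvRaiseWitness_solution) = pvRaiseWitnessOut_solution)

-- ===== LEMMAS AND PROOFS =====

-- the per-element dominated/undominated annotation both phase-1 loops compute via the running cutline
def tags : List (List Int) → Int → List (List Int × Bool)
  | [], _ => []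
  | s :: rest, cut => (s, decide (s.getD 1 0 < cut)) :: tags rest (max cut (s.getD 1 0))

-- Prop form of domByB used throughout the proofs
def domBy (l : List (List Int)) (s : List Int) : Prop :=
  ∃ t ∈ l, s.getD 0 0 < t.getD 0 0 ∧ s.getD 1 0 < t.getD 1 0

lemma domByB_iff (l : List (List Int)) (s : List Int) : domByB l s = true ↔ domBy l s := by
  unfold domByB domBy
  simp

lemma domByB_false_iff (l : List (List Int)) (s : List Int) : domByB l s = false ↔ ¬ domBy l s := by
  rw [Bool.eq_false_iff, ne_eq, domByB_iff]

lemma domBy_congr (l1 l2 : List (List Int)) (s : List Int) (h : ∀ x, x ∈ l1 ↔ x ∈ l2) :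
    domBy l1 s ↔ domBy l2 s := by
  unfold domBy
  constructor
  · rintro ⟨t, ht, h0, h1⟩; exact ⟨t, (h t).mp ht, h0, h1⟩
  · rintro ⟨t, ht, h0, h1⟩; exact ⟨t, (h t).mpr ht, h0, h1⟩

lemma lt_foldl_max_exists {κ : Type} [LinearOrder κ] (t : List κ) :
    ∀ (b c : κ), c < List.foldl max b t → c < b ∨ ∃ y ∈ t, c < y := by
  induction t with
  | nil => intro b c h; exact Or.inl h
  | cons a t ih =>
    intro b c h
    rcases ih (max b a) c h with h' | ⟨y, hy, hcy⟩
    · rcases max_cases b a with ⟨he, _⟩ | ⟨he, _⟩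
      · exact Or.inl (he ▸ h')
      · exact Or.inr ⟨a, List.mem_cons_self, he ▸ h'⟩
    · exact Or.inr ⟨y, List.mem_cons_of_mem _ hy, hcy⟩

lemma keyP_le_iff (t s : List Int) :
    keyP t ≤ keyP s ↔ (s.getD 0 0 < t.getD 0 0 ∨ (t.getD 0 0 = s.getD 0 0 ∧ t.getD 1 0 ≤ s.getD 1 0)) := by
  unfold keyP
  rw [Prod.Lex.toLex_le_toLex]
  constructor
  · rintro (h | ⟨h1, h2⟩)
    · exact Or.inl (by omega)
    · exact Or.inr ⟨by omega, h2⟩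
  · rintro (h | ⟨h1, h2⟩)
    · exact Or.inl (by omega)
    · exact Or.inr ⟨by omega, h2⟩

lemma tags_core (full : List (List Int))
    (hpair : full.Pairwise (fun a b => keyP a ≤ keyP b)) :
    ∀ (l pre : List (List Int)) (p0 : List Int), full = p0 :: (pre ++ l) →
    tags l (List.foldl (fun c s => max c (s.getD 1 0)) (p0.getD 1 0) pre)
      = l.map (fun s => (s, domByB full s)) := by
  intro l
  induction l with
  | nil => intro pre p0 _; rfl
  | cons s rest ih =>
    intro pre p0 hfull
    have hc : List.foldl (fun c s => max c (s.getD 1 0)) (p0.getD 1 0) pre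
        = List.foldl max (p0.getD 1 0) (pre.map (fun s => s.getD 1 0)) := by
      rw [List.foldl_map]
    -- relate every element of p0 :: pre to s, and s to rest, through the pairwise order
    have hsplit : ∀ t ∈ p0 :: pre, keyP t ≤ keyP s := by
      subst hfull
      rcases List.pairwise_cons.mp hpair with ⟨hp0, htail⟩
      intro t ht
      rcases List.mem_cons.mp ht with rfl | ht
      · exact hp0 s (by simp)
      · exact ((List.pairwise_append.mp htail).2.2) t ht s List.mem_cons_self
    have hrest : ∀ t ∈ rest, keyP s ≤ keyP t := by
      subst hfull
      rcases List.pairwise_cons.mp hpair with ⟨_, htail⟩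
      have := (List.pairwise_append.mp htail).2.1
      exact (List.pairwise_cons.mp this).1
    have hiff : (s.getD 1 0 < List.foldl (fun c s => max c (s.getD 1 0)) (p0.getD 1 0) pre)
        ↔ domBy full s := by
      rw [hc]
      constructor
      · intro hlt
        have : s.getD 1 0 < p0.getD 1 0 ∨ ∃ y ∈ pre.map (fun s => s.getD 1 0), s.getD 1 0 < y :=
          lt_foldl_max_exists _ _ _ hlt
        have hex : ∃ t ∈ p0 :: pre, s.getD 1 0 < t.getD 1 0 := by
          rcases this with h | ⟨y, hy, hlty⟩
          · exact ⟨p0, List.mem_cons_self, h⟩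
          · obtain ⟨t, ht, rfl⟩ := List.mem_map.mp hy
            exact ⟨t, List.mem_cons_of_mem _ ht, hlty⟩
        obtain ⟨t, ht, h1⟩ := hex
        have hk := (keyP_le_iff t s).mp (hsplit t ht)
        have h0 : s.getD 0 0 < t.getD 0 0 := by
          rcases hk with h | ⟨_, h2⟩
          · exact h
          · omega
        refine ⟨t, ?_, h0, h1⟩
        rw [hfull]
        rcases List.mem_cons.mp ht with rfl | ht
        · exact List.mem_cons_self
        · exact List.mem_cons_of_mem _ (List.mem_append_left _ ht)
      · rintro ⟨t, htmem, h0, h1⟩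
        rw [hfull] at htmem
        have ht : t ∈ p0 :: pre := by
          rcases List.mem_cons.mp htmem with rfl | htmem
          · exact List.mem_cons_self
          rcases List.mem_append.mp htmem with h | h
          · exact List.mem_cons_of_mem _ h
          rcases List.mem_cons.mp h with rfl | h
          · omega
          · have hk := (keyP_le_iff s t).mp (hrest t h)
            omega
        have hub := (PySem.List.le_foldl_max (pre.map (fun s => s.getD 1 0)) (p0.getD 1 0))
        rcases List.mem_cons.mp ht with rfl | ht
        · omega
        · have := hub.2 (t.getD 1 0) (List.mem_map.mpr ⟨t, ht, rfl⟩)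
          omega
    show (s, decide (s.getD 1 0 < _)) :: tags rest _ = _
    rw [List.map_cons]
    congr 1
    · congr 1
      by_cases hd : s.getD 1 0 < List.foldl (fun c s => max c (s.getD 1 0)) (p0.getD 1 0) pre
      · rw [decide_eq_true hd, (domByB_iff _ _).mpr (hiff.mp hd)]
      · rw [decide_eq_false hd, (domByB_false_iff _ _).mpr (fun hx => hd (hiff.mpr hx))]
    · have hstep : max (List.foldl (fun c s => max c (s.getD 1 0)) (p0.getD 1 0) pre) (s.getD 1 0)
          = List.foldl (fun c s => max c (s.getD 1 0)) (p0.getD 1 0) (pre ++ [s]) := by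
        rw [List.foldl_append]
        rfl
      rw [hstep]
      exact ih (pre ++ [s]) p0 (by rw [hfull]; simp)

lemma tags_ss (full : List (List Int)) (p0 : List Int) (rest : List (List Int))
    (hfull : full = p0 :: rest)
    (hpair : full.Pairwise (fun a b => keyP a ≤ keyP b)) :
    tags full ((full.headD []).getD 1 0) = full.map (fun s => (s, domByB full s)) := by
  subst hfull
  have hnd : ¬ domBy (p0 :: rest) p0 := by
    rintro ⟨t, ht, h0, h1⟩
    rcases List.mem_cons.mp ht with rfl | ht
    · omega
    · have := (keyP_le_iff p0 t).mp ((List.pairwise_cons.mp hpair).1 t ht)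
      omega
  show (p0, decide (p0.getD 1 0 < p0.getD 1 0)) :: tags rest (max (p0.getD 1 0) (p0.getD 1 0)) = _
  rw [List.map_cons]
  congr 1
  · congr 1
    rw [decide_eq_false (lt_irrefl _), (domByB_false_iff _ _).mpr hnd]
  · have := tags_core (p0 :: rest) hpair rest [] p0 rfl
    simpa using this

lemma phase1_eq (w : List Int) : ∀ (l : List (List Int)) (cut : Int) (worst : PySem.Set (List Int)),
    phase1 w l cut worst =
      if (w, true) ∈ tags l cut then none
      else some (PySem.Set.update worst (((tags l cut).filter (fun p => p.2)).map Prod.fst)) := by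
  intro l
  induction l with
  | nil => intro cut worst; simp [phase1, tags, PySem.Set.update]
  | cons s rest ih =>
    intro cut worst
    have e1 : phase1 w (s :: rest) cut worst
        = if s.getD 1 0 < cut then
            (if s = w then none else phase1 w rest (max cut (s.getD 1 0)) (worst.add s))
          else phase1 w rest (max cut (s.getD 1 0)) worst := rfl
    have e2 : tags (s :: rest) cut
        = (s, decide (s.getD 1 0 < cut)) :: tags rest (max cut (s.getD 1 0)) := rfl
    rw [e1, e2]
    by_cases h : s.getD 1 0 < cut
    · have hd : decide (s.getD 1 0 < cut) = true := decide_eq_true h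
      rw [if_pos h, hd]
      by_cases hw : s = w
      · rw [if_pos hw, hw, if_pos (List.mem_cons_self)]
      · rw [if_neg hw, ih]
        have hne : ((w, true) : List Int × Bool) ≠ (s, true) := by
          intro he; injection he with h1 _; exact hw h1.symm
        rw [if_congr ((List.mem_cons.trans (or_iff_right hne)).symm) rfl rfl]
        split
        · rfl
        · rw [List.filter_cons_of_pos (by rfl), List.map_cons]
          simp [PySem.Set.update]
    · have hd : decide (s.getD 1 0 < cut) = false := decide_eq_false h
      rw [if_neg h, hd, ih]
      have hne : ((w, true) : List Int × Bool) ≠ (s, false) := by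
        intro he; injection he with _ h2; cases h2
      rw [if_congr ((List.mem_cons.trans (or_iff_right hne)).symm) rfl rfl]
      split
      · rfl
      · rw [List.filter_cons_of_neg (by simp)]

lemma loopB_eq (w : List Int) (wsum : Int) : ∀ (l : List (List Int)) (cut : Int) (rank : Int),
    loopB w wsum l cut rank =
      if (w, true) ∈ tags l cut then -1
      else rank + (((tags l cut).filter (fun p => !p.2 && decide (wsum < p.1.sum))).length : Int) := by
  intro l
  induction l with
  | nil => intro cut rank; simp [loopB, tags]
  | cons s rest ih =>
    intro cut rank
    have e1 : loopB w wsum (s :: rest) cut rank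
        = if s.getD 1 0 < cut then
            (if s = w then -1 else loopB w wsum rest (max cut (s.getD 1 0)) rank)
          else loopB w wsum rest (max cut (s.getD 1 0))
                 (if wsum < s.sum then rank + 1 else rank) := rfl
    have e2 : tags (s :: rest) cut
        = (s, decide (s.getD 1 0 < cut)) :: tags rest (max cut (s.getD 1 0)) := rfl
    rw [e1, e2]
    by_cases h : s.getD 1 0 < cut
    · have hd : decide (s.getD 1 0 < cut) = true := decide_eq_true h
      rw [if_pos h, hd]
      by_cases hw : s = w
      · rw [if_pos hw, hw, if_pos (List.mem_cons_self)]
      · rw [if_neg hw, ih]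
        have hne : ((w, true) : List Int × Bool) ≠ (s, true) := by
          intro he; injection he with h1 _; exact hw h1.symm
        rw [if_congr ((List.mem_cons.trans (or_iff_right hne)).symm) rfl rfl]
        split
        · rfl
        · rw [List.filter_cons_of_neg (by simp)]
    · have hd : decide (s.getD 1 0 < cut) = false := decide_eq_false h
      rw [if_neg h, hd, ih]
      have hne : ((w, true) : List Int × Bool) ≠ (s, false) := by
        intro he; injection he with _ h2; cases h2
      rw [if_congr ((List.mem_cons.trans (or_iff_right hne)).symm) rfl rfl]
      split
      · rfl
      · by_cases hs : wsum < s.sum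
        · rw [if_pos hs, List.filter_cons_of_pos (by simp [hs]), List.length_cons]
          push_cast; ring
        · rw [if_neg hs, List.filter_cons_of_neg (by simp [hs])]

lemma filter_eq_takeWhile {α : Type} (P : α → Bool) :
    ∀ l : List α, l.Pairwise (fun a b => P b = true → P a = true) → l.filter P = l.takeWhile P := by
  intro l
  induction l with
  | nil => intro _; rfl
  | cons a l ih =>
    intro hpw
    rcases List.pairwise_cons.mp hpw with ⟨hhead, htail⟩
    by_cases hPa : P a = true
    · rw [List.filter_cons_of_pos hPa, List.takeWhile_cons_of_pos hPa, ih htail]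
    · rw [List.filter_cons_of_neg hPa, List.takeWhile_cons_of_neg hPa]
      rw [List.filter_eq_nil_iff]
      intro b hb hPb
      exact hPa (hhead b hb hPb)

lemma prefix_count {α : Type} (P : α → Bool) (l : List α)
    (hpw : l.Pairwise (fun a b => P b = true → P a = true)) :
    ∀ i (h : i < l.length), (P l[i] = true ↔ i < (l.filter P).length) := by
  intro i h
  rw [filter_eq_takeWhile P l hpw]
  constructor
  · intro hP
    by_contra hlt
    push Not at hlt
    -- l[N] fails P where N = (takeWhile).length ≤ i; pairwise pushes failure back to i: contradiction
    have hNlen : (l.takeWhile P).length < l.length := lt_of_le_of_lt hlt h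
    have hfail : P (l[(l.takeWhile P).length]) = false := by
      have := List.takeWhile_append_dropWhile (p := P) (l := l)
      rcases hdw : l.dropWhile P with _ | ⟨d, ds⟩
      · exfalso
        have : l.length = (l.takeWhile P).length := by
          conv_lhs => rw [← this]
          rw [hdw]; simp
        omega
      · have hd : P d = false := by
          have := List.head?_dropWhile_not P l
          rw [hdw] at this; simpa using this
        have hle : l = l.takeWhile P ++ d :: ds := by
          conv_lhs => rw [← List.takeWhile_append_dropWhile (p := P) (l := l)]
          rw [hdw]
        have hstep : (l.takeWhile P ++ d :: ds)[(l.takeWhile P).length]? = some d := by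
          rw [List.getElem?_append_right (le_refl _)]
          simp
        rw [← hle] at hstep
        have he : l[(l.takeWhile P).length] = d :=
          Option.some.inj ((List.getElem?_eq_getElem hNlen).symm.trans hstep)
        rw [he]; exact hd
    rcases lt_or_eq_of_le hlt with hlt' | heq
    · have := (List.pairwise_iff_getElem.mp hpw) _ _ hNlen h hlt' hP
      rw [hfail] at this; cases this
    · simp only [heq] at hfail; rw [hP] at hfail; cases hfail
  · intro hlt
    have hpre := List.takeWhile_prefix (l := l) P
    have heq : (l.takeWhile P)[i] = l[i] := List.IsPrefix.getElem hpre hlt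
    exact List.mem_takeWhile_imp (heq ▸ List.getElem_mem hlt)

lemma insertBy_stable {α κ : Type} [LinearOrder κ] (key : α → κ) (x y : α) :
    ∀ (pre suf : List α), (∀ z ∈ pre, key z < key x) →
    ∃ pre' suf', PySem.List.insertBy (fun a b => decide (key a < key b)) y (pre ++ x :: suf)
        = pre' ++ x :: suf' ∧ ∀ z ∈ pre', key z < key x := by
  intro pre
  induction pre with
  | nil =>
    intro suf _
    by_cases h : key y < key x
    · refine ⟨[y], suf, ?_, ?_⟩
      · show PySem.List.insertBy _ y (x :: suf) = _
        rw [PySem.List.insertBy]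
        rw [if_pos (decide_eq_true h)]
        rfl
      · intro z hz; rcases List.mem_singleton.mp hz with rfl; exact h
    · refine ⟨[], PySem.List.insertBy (fun a b => decide (key a < key b)) y suf, ?_, by simp⟩
      show PySem.List.insertBy _ y (x :: suf) = _
      rw [PySem.List.insertBy]
      rw [if_neg (by simpa using h)]
      rfl
  | cons z pre ih =>
    intro suf hpre
    have hz : key z < key x := hpre z List.mem_cons_self
    by_cases h : key y < key z
    · refine ⟨y :: z :: pre, suf, ?_, ?_⟩
      · show PySem.List.insertBy _ y (z :: (pre ++ x :: suf)) = _
        rw [PySem.List.insertBy]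
        rw [if_pos (decide_eq_true h)]
        rfl
      · intro u hu
        rcases List.mem_cons.mp hu with rfl | hu
        · exact lt_trans h hz
        · exact hpre u hu
    · obtain ⟨pre', suf', heq, hpre'⟩ := ih suf (fun u hu => hpre u (List.mem_cons_of_mem _ hu))
      refine ⟨z :: pre', suf', ?_, ?_⟩
      · show PySem.List.insertBy _ y (z :: (pre ++ x :: suf)) = _
        rw [PySem.List.insertBy]
        rw [if_neg (by simpa using h), heq]
        rfl
      · intro u hu
        rcases List.mem_cons.mp hu with rfl | hu
        · exact hz
        · exact hpre' u hu

lemma sorted_head_stable {α κ : Type} [LinearOrder κ] (key : α → κ) (x : α) (xs : List α) :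
    ∃ pre suf, PySem.List.sorted (x :: xs) key = pre ++ x :: suf ∧ ∀ z ∈ pre, key z < key x := by
  have hcore : ∀ (l : List α) (pre suf : List α), (∀ z ∈ pre, key z < key x) →
      ∃ pre' suf',
        List.foldl (fun acc y => PySem.List.insertBy (fun a b => decide (key a < key b)) y acc)
          (pre ++ x :: suf) l = pre' ++ x :: suf' ∧ ∀ z ∈ pre', key z < key x := by
    intro l
    induction l with
    | nil => intro pre suf hpre; exact ⟨pre, suf, rfl, hpre⟩
    | cons y l ih =>
      intro pre suf hpre
      obtain ⟨pre', suf', heq, hpre'⟩ := insertBy_stable key x y pre suf hpre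
      obtain ⟨pre'', suf'', heq2, hpre''⟩ := ih pre' suf' hpre'
      refine ⟨pre'', suf'', ?_, hpre''⟩
      rw [List.foldl_cons, heq, heq2]
  have h0 : PySem.List.sorted (x :: xs) key
      = List.foldl (fun acc y => PySem.List.insertBy (fun a b => decide (key a < key b)) y acc)
          ([] ++ x :: []) xs := by
    rw [PySem.List.sorted_eq_foldl_insertBy]
    rfl
  rw [h0]
  exact hcore xs [] [] (by simp)

lemma walk_pos (il : List (List Int)) (wsum : Int) (N : Nat) (hN1 : 1 ≤ N)
    (hchar : ∀ i (h : i < il.length), (wsum < il[i].sum ↔ i < N))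
    (hmono : ∀ p q (hpq : p ≤ q) (hq : q < il.length), il[q].sum ≤ (il[p]'(Nat.lt_of_le_of_lt hpq hq)).sum) :
    ∀ fuel (j : Nat), j < fuel → N ≤ j → ∀ (hj : j < il.length), il[j].sum = wsum →
      walkA il fuel (j : Int) = (N : Int) + 1 := by
  intro fuel
  induction fuel with
  | zero => intro j hj; omega
  | succ f ih =>
    intro j hjf hNj hj hsum
    have hj1 : j - 1 < il.length := by omega
    have hget : PySem.List.pyGet? il (j : Int) = some il[j] :=
      PySem.List.pyGet?_ofNat il j hj
    have hcast : ((j : Int) - 1) = ((j - 1 : Nat) : Int) := by omega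
    have hget1 : PySem.List.pyGet? il ((j : Int) - 1) = some (il[j-1]'hj1) := by
      rw [hcast]; exact PySem.List.pyGet?_ofNat il (j-1) hj1
    show (match PySem.List.pyGet? il (j : Int), PySem.List.pyGet? il ((j : Int) - 1) with
      | some a, some b => if a.sum = b.sum then walkA il f ((j : Int) - 1) else (j : Int) + 1
      | _, _ => 0) = (N : Int) + 1
    rw [hget, hget1]
    rcases Nat.eq_or_lt_of_le hNj with heq | hlt
    · -- j = N : previous element has sum > wsum, break
      have hprev : wsum < (il[j-1]'hj1).sum := (hchar (j-1) hj1).mpr (by omega)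
      simp only []
      rw [if_neg (by rw [hsum]; omega)]
      omega
    · -- j > N : previous element also has sum wsum, continue
      have hle : (il[j-1]'hj1).sum ≤ wsum := by
        have := (hchar (j-1) hj1)
        by_contra hc
        push Not at hc
        have := this.mp hc
        omega
      have hge : wsum ≤ (il[j-1]'hj1).sum := by
        have := hmono (j-1) j (by omega) hj
        omega
      have heq : (il[j-1]'hj1).sum = wsum := le_antisymm hle hge
      simp only []
      rw [if_pos (by rw [hsum, heq])]
      rw [hcast]
      exact ih (j-1) (by omega) (by omega) hj1 heq

lemma walk_zero (il : List (List Int)) (wsum : Int)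
    (hchar : ∀ i (h : i < il.length), ¬ (wsum < il[i].sum))
    (hmono : ∀ p q (hpq : p ≤ q) (hq : q < il.length), il[q].sum ≤ (il[p]'(Nat.lt_of_le_of_lt hpq hq)).sum)
    (hex : ∃ k, ∃ (hk : k < il.length), il[k].sum < wsum) :
    ∀ fuel (j : Nat), j < fuel → ∀ (hj : j < il.length), il[j].sum = wsum →
      walkA il fuel (j : Int) = 1 := by
  intro fuel
  induction fuel with
  | zero => intro j hj; omega
  | succ f ih =>
    intro j hjf hj hsum
    have hget : PySem.List.pyGet? il (j : Int) = some il[j] :=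
      PySem.List.pyGet?_ofNat il j hj
    rcases Nat.eq_zero_or_pos j with hz | hpos
    · -- j = 0 : compare with il[-1] = last, whose sum is < wsum
      subst hz
      have hlen1 : il.length - 1 < il.length := by omega
      have hlast : il.getLast? = some (il[il.length - 1]'hlen1) := by
        rw [List.getLast?_eq_getElem?]
        exact List.getElem?_eq_getElem hlen1
      obtain ⟨k, hk, hklt⟩ := hex
      have hlastlt : (il[il.length - 1]'hlen1).sum < wsum := by
        have := hmono k (il.length - 1) (by omega) hlen1
        omega
      show (match PySem.List.pyGet? il ((0 : Nat) : Int), PySem.List.pyGet? il (((0:Nat) : Int) - 1) with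
        | some a, some b => if a.sum = b.sum then walkA il f (((0:Nat) : Int) - 1) else ((0:Nat) : Int) + 1
        | _, _ => 0) = 1
      have hm1 : (((0:Nat) : Int) - 1) = (-1 : Int) := by norm_num
      rw [hget, hm1, PySem.List.pyGet?_neg_one, hlast]
      simp only []
      rw [if_neg (by rw [hsum]; omega)]
      norm_num
    · have hj1 : j - 1 < il.length := by omega
      have hcast : ((j : Int) - 1) = ((j - 1 : Nat) : Int) := by omega
      have hget1 : PySem.List.pyGet? il ((j : Int) - 1) = some (il[j-1]'hj1) := by
        rw [hcast]; exact PySem.List.pyGet?_ofNat il (j-1) hj1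
      have hle : (il[j-1]'hj1).sum ≤ wsum := by
        have := hchar (j-1) hj1; omega
      have hge : wsum ≤ (il[j-1]'hj1).sum := by
        have := hmono (j-1) j (by omega) hj; omega
      have heq : (il[j-1]'hj1).sum = wsum := le_antisymm hle hge
      show (match PySem.List.pyGet? il (j : Int), PySem.List.pyGet? il ((j : Int) - 1) with
        | some a, some b => if a.sum = b.sum then walkA il f ((j : Int) - 1) else (j : Int) + 1
        | _, _ => 0) = 1
      rw [hget, hget1]
      simp only []
      rw [if_pos (by rw [hsum, heq])]
      rw [hcast]
      exact ih (j-1) (by omega) hj1 heq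

-- ===== VERDICT (by name: the statement is the Claim_ definition above) =====
theorem solution_spec : Claim_equal_solution := by
  intro scores _ hpre
  obtain ⟨hne, hlen2, hnocrash⟩ := hpre
  unfold Spec_solution
  obtain ⟨w, tl, rfl⟩ := List.exists_cons_of_ne_nil hne
  have e0 : PySem.List.pyGet? (w :: tl) 0 = some w := PySem.List.pyGet?_zero_cons w tl
  simp only [solution, solution_alt, e0]
  -- the sorted list and its structure
  have hpairss : (PySem.List.sorted (w :: tl) keyP).Pairwise (fun a b => keyP a ≤ keyP b) :=
    PySem.List.sorted_pairwise (w :: tl) keyP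
  have hssne : PySem.List.sorted (w :: tl) keyP ≠ [] := by
    rw [ne_eq, PySem.List.sorted_eq_nil_iff]; simp
  obtain ⟨s0, rest, hss⟩ := List.exists_cons_of_ne_nil hssne
  have hmemss : ∀ x, x ∈ PySem.List.sorted (w :: tl) keyP ↔ x ∈ w :: tl := by
    intro x; exact PySem.List.mem_sorted (w :: tl) keyP false x
  have hdom_iff : ∀ s, domBy (PySem.List.sorted (w :: tl) keyP) s ↔ domBy (w :: tl) s := by
    intro s; exact domBy_congr _ _ s hmemss
  have htags := tags_ss (PySem.List.sorted (w :: tl) keyP) s0 rest hss hpairss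
  have hw_ss : w ∈ PySem.List.sorted (w :: tl) keyP := (hmemss w).mpr List.mem_cons_self
  have hmemW : ((w, true) ∈ tags (PySem.List.sorted (w :: tl) keyP)
        (((PySem.List.sorted (w :: tl) keyP).headD []).getD 1 0))
      ↔ domBy (PySem.List.sorted (w :: tl) keyP) w := by
    rw [htags]
    constructor
    · intro hm
      obtain ⟨s, _, heq⟩ := List.mem_map.mp hm
      injection heq with h1 h2
      rw [h1] at h2
      exact (domByB_iff _ _).mp h2
    · intro hd
      exact List.mem_map.mpr ⟨w, hw_ss, by rw [(domByB_iff _ _).mpr hd]⟩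
  rw [loopB_eq]
  set ssl := PySem.List.sorted (w :: tl) keyP with hssl
  set DD := fun s : List Int => domByB ssl s with hDD
  have hL0 : ((tags ssl ((ssl.headD []).getD 1 0)).filter (fun p => p.2)).map Prod.fst
      = ssl.filter DD := by
    rw [htags, List.filter_map, List.map_map]
    have h1 : ((fun p => p.2) ∘ (fun s => (s, domByB ssl s))) = DD := rfl
    have h2 : (Prod.fst ∘ (fun (s : List Int) => (s, domByB ssl s))) = id := rfl
    rw [h1, h2, List.map_id]
  by_cases hdw : domBy ssl w
  · have hph : phase1 w ssl ((ssl.headD []).getD 1 0) PySem.Set.empty = none := by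
      rw [phase1_eq, if_pos (hmemW.mpr hdw)]
    rw [if_pos (hmemW.mpr hdw)]
    split
    · rfl
    · next worst heq => rw [hph] at heq; cases heq
  · have hph : phase1 w ssl ((ssl.headD []).getD 1 0) PySem.Set.empty
        = some (PySem.Set.empty.update (ssl.filter DD)) := by
      rw [phase1_eq, if_neg (fun hm => hdw (hmemW.mp hm)), hL0]
    rw [if_neg (fun hm => hdw (hmemW.mp hm))]
    split
    · next heq => rw [hph] at heq; cases heq
    next worst heq =>
    rw [hph] at heq
    injection heq with heq'
    subst heq'
    set W := PySem.Set.empty.update (ssl.filter DD) with hWdef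
    have hWmem : ∀ x, W.contains x = true ↔ (x ∈ ssl ∧ domBy ssl x) := by
      intro x
      have hofl : W = PySem.Set.ofList (ssl.filter DD) := by
        rw [hWdef, PySem.Set.ofList_eq_foldl]; rfl
      have h1 : W.contains x = true ↔ x ∈ W := List.contains_iff_mem
      rw [h1, hofl, PySem.Set.mem_ofList, List.mem_filter, hDD]
      simp [domByB_iff]
    have hWeq : ∀ x ∈ ssl, W.contains x = DD x := by
      intro x hx
      by_cases hd2 : domBy ssl x
      · rw [(hWmem x).mpr ⟨hx, hd2⟩, hDD]; exact ((domByB_iff _ _).mpr hd2).symm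
      · have hfalse : ¬ (W.contains x = true) := fun hc => hd2 ((hWmem x).mp hc).2
        rw [Bool.not_eq_true] at hfalse
        rw [hfalse, hDD]; exact ((domByB_false_iff _ _).mpr hd2).symm
    have hinc : List.foldl (fun acc s => if W.contains s = true then acc else acc ++ [s]) [] ssl
        = ssl.filter (fun s => !DD s) := by
      have h1 : (fun (acc : List (List Int)) s => if W.contains s = true then acc else acc ++ [s])
          = fun acc s => if (!W.contains s) = true then acc ++ [id s] else acc := by
        funext acc s; cases W.contains s <;> simp
      rw [h1, PySem.List.foldl_append_if, List.map_id, List.nil_append]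
      exact List.filter_congr (fun x hx => by rw [hWeq x hx])
    rw [hinc]
    set inc := ssl.filter (fun s => !DD s) with hincdef
    set il := PySem.List.sorted inc (fun x => -x.sum) with hildef
    have hw_inc : w ∈ inc := List.mem_filter.mpr ⟨hw_ss, by rw [hDD, Bool.not_eq_true', domByB_false_iff]; exact hdw⟩
    have hw_il : w ∈ il := by
      rw [hildef]; exact (PySem.List.mem_sorted inc _ false w).mpr hw_inc
    obtain ⟨pr, hidx⟩ : ∃ pr, PySem.List.index? il w = some pr :=
      Option.isSome_iff_exists.mp ((PySem.List.index?_isSome_iff il w).mpr hw_il)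
    obtain ⟨hprlen, hilpr, hilfirst⟩ := PySem.List.getElem_of_index?_eq_some hidx
    set P := fun s : List Int => decide (w.sum < s.sum) with hP
    have hpw2 : il.Pairwise (fun a b => P b = true → P a = true) := by
      have hp0 := PySem.List.sorted_pairwise inc (fun x => -x.sum)
      rw [← hildef] at hp0
      refine hp0.imp ?_
      intro a b hab
      rw [hP]; simp only [decide_eq_true_eq]
      intro h; omega
    have hchar := prefix_count P il hpw2
    set N := (il.filter P).length with hNdef
    have hcharP : ∀ i (h : i < il.length), (w.sum < il[i].sum ↔ i < N) := by
      intro i h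
      have := hchar i h
      rw [hP] at this; simpa using this
    have hmono : ∀ p q (hpq : p ≤ q) (hq : q < il.length),
        il[q].sum ≤ (il[p]'(Nat.lt_of_le_of_lt hpq hq)).sum := by
      intro p q hpq hq
      have hq' : q < (PySem.List.sorted inc (fun x => -x.sum)).length := by rw [← hildef]; exact hq
      have := PySem.List.key_sorted_getElem_mono inc (fun x => -x.sum) hpq hq'
      simp only [← hildef] at this
      omega
    have hcnt : (List.filter (fun p => !p.2 && decide (w.sum < p.1.sum))
          (tags ssl ((ssl.headD []).getD 1 0))).length = N := by
      rw [htags, List.filter_map, List.length_map]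
      have hcomp : ((fun p : List Int × Bool => !p.2 && decide (w.sum < p.1.sum))
            ∘ (fun s => (s, domByB ssl s))) = fun s => (!DD s) && P s := by
        funext s; simp [hDD, hP, Function.comp]
      rw [hcomp]
      have hperm : (il.filter P).Perm (inc.filter P) := by
        rw [hildef]; exact (PySem.List.sorted_perm inc _ false).filter P
      rw [hNdef, hperm.length_eq, hincdef, List.filter_filter]
      have hand : (fun a : List Int => P a && !DD a) = fun a => !DD a && P a :=
        funext fun a => Bool.and_comm _ _
      rw [hand]
    rw [hcnt]
    split
    · next heq => rw [hidx] at heq; cases heq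
    next pr' heq =>
    rw [hidx] at heq
    injection heq with heq'
    subst heq'
    have hsum_pr : il[pr].sum = w.sum := by rw [hilpr]
    have hprN : N ≤ pr := by
      by_contra hc
      push Not at hc
      have := (hcharP pr hprlen).mpr hc
      omega
    by_cases hpr0 : pr = 0
    · rw [if_pos hpr0]
      have hN0 : N = 0 := by
        by_contra hc
        have h1 : (0:Nat) < N := Nat.pos_of_ne_zero hc
        have h2 := (hcharP 0 (Nat.lt_of_le_of_lt (Nat.zero_le pr) hprlen)).mpr h1
        have h3 : il[0]'(Nat.lt_of_le_of_lt (Nat.zero_le pr) hprlen) = w := by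
          have h := hilpr
          simp only [hpr0] at h
          exact h
        rw [h3] at h2; omega
      rw [hN0]; norm_num
    · rw [if_neg hpr0]
      by_cases hN1 : 1 ≤ N
      · have hwp := walk_pos il w.sum N hN1 hcharP hmono
          (pr + il.length + 2) pr (by omega) hprN hprlen hsum_pr
        rw [hwp]; ring
      · have hN0 : N = 0 := by omega
        by_cases hex : ∃ k, ∃ (hk : k < il.length), il[k].sum < w.sum
        · have hwz := walk_zero il w.sum
            (fun i h => by have := hcharP i h; omega) hmono hex
            (pr + il.length + 2) pr (by omega) hprlen hsum_pr
          rw [hwz, hN0]; norm_num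
        · exfalso
          apply hnocrash
          push Not at hex
          have hallil : ∀ k (hk : k < il.length), il[k].sum = w.sum := by
            intro k hk
            have h1 : ¬ (w.sum < il[k].sum) := by
              intro hlt
              have := (hcharP k hk).mp hlt
              omega
            have h2 := hex k hk
            omega
          have hndw : ¬ domBy (w :: tl) w := fun hd => hdw ((hdom_iff w).mpr hd)
          refine ⟨by simpa using (domByB_false_iff (w :: tl) w).mpr hndw, ?_, ?_⟩
          · intro s hs
            by_cases hd2 : domBy ssl s
            · exact Or.inl ((domByB_iff _ _).mpr ((hdom_iff s).mp hd2))
            · right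
              have hsinc : s ∈ inc :=
                List.mem_filter.mpr ⟨(hmemss s).mpr hs, by rw [hDD, Bool.not_eq_true', domByB_false_iff]; exact hd2⟩
              have hsil : s ∈ il := by
                rw [hildef]; exact (PySem.List.mem_sorted inc _ false s).mpr hsinc
              obtain ⟨k, hk, hks⟩ := List.getElem_of_mem hsil
              show s.sum = w.sum
              rw [← hks]; exact hallil k hk
          · -- a non-dominated rival sorting strictly before wanho
            have hinceq : il = inc := by
              have hpairc : inc.Pairwise
                  (fun a b => (fun x : List Int => -x.sum) a ≤ (fun x : List Int => -x.sum) b) := by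
                apply List.pairwise_of_forall_mem_list
                intro a ha b hb
                have hsa : a.sum = w.sum := by
                  have hail : a ∈ il := by
                    rw [hildef]; exact (PySem.List.mem_sorted inc _ false a).mpr ha
                  obtain ⟨k, hk, hks⟩ := List.getElem_of_mem hail
                  rw [← hks]; exact hallil k hk
                have hsb : b.sum = w.sum := by
                  have hbil : b ∈ il := by
                    rw [hildef]; exact (PySem.List.mem_sorted inc _ false b).mpr hb
                  obtain ⟨k, hk, hks⟩ := List.getElem_of_mem hbil
                  rw [← hks]; exact hallil k hk
                simp only []
                omega
              rw [hildef]
              exact PySem.List.sorted_eq_self_of_pairwise inc _ hpairc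
            obtain ⟨preW, sufW, hsplit, hpreW⟩ := sorted_head_stable keyP w tl
            rw [← hssl] at hsplit
            have hfi : inc = preW.filter (fun s => !DD s) ++ w :: sufW.filter (fun s => !DD s) := by
              rw [hincdef, hsplit, List.filter_append,
                List.filter_cons_of_pos (by rw [hDD, Bool.not_eq_true', domByB_false_iff]; exact hdw)]
            have hpe : preW.filter (fun s => !DD s) ≠ [] := by
              intro hnil
              apply hilfirst 0 (Nat.pos_of_ne_zero hpr0)
              have hileq : il = w :: sufW.filter (fun s => !DD s) := by
                rw [hinceq, hfi, hnil, List.nil_append]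
              simp [hileq]
            obtain ⟨t, ht⟩ := List.exists_mem_of_ne_nil _ hpe
            obtain ⟨htpre, htnd⟩ := List.mem_filter.mp ht
            refine ⟨t, ?_, ?_, ?_⟩
            · have htss : t ∈ ssl := by rw [hsplit]; exact List.mem_append_left _ htpre
              exact (hmemss t).mp htss
            · rw [domByB_false_iff]
              intro hd3
              rw [hDD, Bool.not_eq_true', domByB_false_iff] at htnd
              exact htnd ((hdom_iff t).mpr hd3)
            · have hklt := hpreW t htpre
              have hlex := Prod.Lex.toLex_lt_toLex.mp hklt
              show ((w :: tl).headD []).getD 0 0 < t.getD 0 0 ∨ _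
              simp only [List.headD_cons]
              rcases hlex with h | ⟨h1, h2⟩
              · left; omega
              · right; exact ⟨by omega, h2⟩

@[simp] theorem solution_raises : Claim_raises_solution := by
  unfold Claim_raises_solution
  constructor
  · intro scores _ hr hp
    exact hp.2.2 hr.2.2
  · exact ⟨by decide, by decide, by decide⟩
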